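-- pv_equiv track=rewrite | github.com/hyunmoon-han/SQL_SORT | original.py | replace_empty_parentheses
-- ===== SOURCE A (Python) =====
-- def replace_empty_parentheses(sql):
--     stack = []  # 괄호의 위치를 저장할 스택
--     pairs = []  # 괄호 쌍을 저장할 리스트
--     modified_sql = list(sql)  # 문자열을 리스트로 변환
--
--     # 모든 괄호의 위치를 찾음
--     for i, char in enumerate(sql):
--         if char == '(':
--             stack.append(i)  # 여는 괄호 위치 저장
--         elif char == ')':
--             if stack:
--                 start = stack.pop()  # 가장 안쪽 여는 괄호부터 처리
--                 pairs.append((start, i))  # 여는 괄호와 닫는 괄호의 위치 저장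
--
--     # 괄호를 못 찾을 경우, 리턴
--     if len(pairs) == 0:
--         return sql
--
--     # 괄호 쌍을 **오른쪽에서 왼쪽으로(가장 바깥쪽부터)** 처리
--     for start, end in pairs:
--         inside_sql = "".join(modified_sql[start + 1:end])  # 괄호 내부 문자열 추출
--
--         # 괄호 내부가 비어 있으면, ㄱ,ㄴ으로 치환
--         if not inside_sql.strip():
--             modified_sql[start] = 'ㄱ'  # 여는 괄호를 ㄱ로 치환
--             modified_sql[end] = 'ㄴ'  # 닫는 괄호를 ㄴ로 치환
--
--
--     return "".join(modified_sql)
-- ===== SOURCE B (Python) =====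
-- def replace_empty_parentheses(sql):
--     # One pass: a running count of non-whitespace characters; a pair interior is
--     # whitespace-only iff the count right after '(' equals the count at ')'.
--     out = list(sql)
--     stack = []
--     nonws = 0
--     for i, c in enumerate(sql):
--         if c == '(':
--             stack.append((i, nonws))
--         elif c == ')' and stack:
--             s, cnt = stack.pop()
--             if nonws == cnt + 1:
--                 out[s] = 'ㄱ'
--                 out[i] = 'ㄴ'
--         if not c.isspace():
--             nonws += 1
--     return "".join(out)
-- ===== Notes on version B (the rewrite author's own statement) =====
-- stated objective: alternative
-- what changed: Single pass with a running non-whitespace counter stored per open-paren stack frame gives an O(1) whitespace-only-interior test per pair (replacements never change whitespace-ness, so testing against the original counts is exact), instead of A's two-phase scan that collects all pairs and then joins and strips each pair's interior slice.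
import Mathlib
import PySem

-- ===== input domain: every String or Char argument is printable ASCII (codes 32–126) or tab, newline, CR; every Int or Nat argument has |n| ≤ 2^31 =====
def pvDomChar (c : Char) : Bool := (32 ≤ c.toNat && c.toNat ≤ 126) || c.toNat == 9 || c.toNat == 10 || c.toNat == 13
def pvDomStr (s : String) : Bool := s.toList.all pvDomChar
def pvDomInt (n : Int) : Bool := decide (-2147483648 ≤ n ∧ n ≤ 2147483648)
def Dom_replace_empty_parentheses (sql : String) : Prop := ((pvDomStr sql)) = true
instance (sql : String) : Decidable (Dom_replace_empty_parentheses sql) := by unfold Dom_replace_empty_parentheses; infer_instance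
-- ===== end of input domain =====

-- B replaces A's two-phase scan (collect pairs, then join+strip each pair's interior slice)
-- by a single pass with a running non-whitespace count per stack frame: an O(1) emptiness test per pair.

-- ===== PORT A =====
-- first loop of A: over enumerate(sql), maintain (stack of '(' positions, list of matched pairs)
def pvAStep1 (st : List Int × List (Int × Int)) (ic : Int × Char) : List Int × List (Int × Int) :=
  if ic.2 = '(' then (ic.1 :: st.1, st.2)
  else if ic.2 = ')' then
    match st.1 with
    | [] => st
    | s :: rest => (rest, st.2 ++ [(s, ic.1)])
  else st

-- second loop of A: for each pair, if the interior slice strips to empty, write the placeholders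
def pvAStep2 (m : List Char) (p : Int × Int) : List Char :=
  let inside := PySem.List.slice m (some (p.1 + 1)) (some p.2)
  if PySem.Chars.strip inside = [] then
    PySem.List.pySetD (PySem.List.pySetD m p.1 'ㄱ') p.2 'ㄴ'
  else m

def replace_empty_parentheses (sql : String) : String :=
  let modified := sql.toList
  let res := (PySem.List.enumerate sql.toList).foldl pvAStep1 ([], [])
  if res.2 = [] then sql
  else String.ofList (res.2.foldl pvAStep2 modified)

-- ===== PORT B =====
-- B's single loop body: state (out, stack of (pos, count-at-push), running non-ws count)
def pvBStep (st : List Char × List (Int × Int) × Int) (ic : Int × Char) :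
    List Char × List (Int × Int) × Int :=
  let s1 :=
    if ic.2 = '(' then (st.1, (ic.1, st.2.2) :: st.2.1)
    else if ic.2 = ')' then
      match st.2.1 with
      | [] => (st.1, ([] : List (Int × Int)))
      | (s, cnt) :: rest =>
        (if st.2.2 = cnt + 1 then
           PySem.List.pySetD (PySem.List.pySetD st.1 s 'ㄱ') ic.1 'ㄴ'
         else st.1, rest)
    else (st.1, st.2.1)
  (s1.1, s1.2, if PySem.Chars.isspace ic.2 then st.2.2 else st.2.2 + 1)

def replace_empty_parentheses_alt (sql : String) : String :=
  let res := (PySem.List.enumerate sql.toList).foldl pvBStep (sql.toList, [], 0)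
  String.ofList res.1

-- ===== PRECONDITION & SPEC =====
def Spec_replace_empty_parentheses (sql : String) (out : String) : Prop := out = replace_empty_parentheses_alt sql
instance (sql : String) (out : String) : Decidable (Spec_replace_empty_parentheses sql out) := by unfold Spec_replace_empty_parentheses; infer_instance

-- ===== CLAIM (what is proved, stated in full; the proofs are below) =====
def Claim_equal_replace_empty_parentheses : Prop := ∀ (sql : String), Dom_replace_empty_parentheses sql → Spec_replace_empty_parentheses sql (replace_empty_parentheses sql)

-- ===== LEMMAS AND PROOFS =====

-- non-whitespace count of a character list
def pvNW (cs : List Char) : Nat := cs.countP (fun c => !PySem.Chars.isspace c)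

-- "the interior of the pair (s, e) in the ORIGINAL string is whitespace-only"
def pvCond (l0 : List Char) (s e : Nat) : Bool :=
  ((l0.drop (s + 1)).take (e - (s + 1))).all PySem.Chars.isspace

-- the reference pair-processing step: condition read off the original string
def pvAp (l0 : List Char) (m : List Char) (p : Int × Int) : List Char :=
  if pvCond l0 p.1.toNat p.2.toNat then (m.set p.1.toNat 'ㄱ').set p.2.toNat 'ㄴ' else m

def pvStInv (l0 : List Char) (j : Nat) (st : List Int) : Prop :=
  ∀ x ∈ st, ∃ k : Nat, x = (k : Int) ∧ k < j ∧ l0[k]? = some '('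

def pvPrInv (l0 : List Char) (j : Nat) (pr : List (Int × Int)) : Prop :=
  ∀ p ∈ pr, ∃ s e : Nat, p = ((s : Int), (e : Int)) ∧ s < e ∧ e < j ∧
    l0[s]? = some '(' ∧ l0[e]? = some ')'

lemma pvStrip_nil_iff (cs : List Char) :
    PySem.Chars.strip cs = [] ↔ cs.all PySem.Chars.isspace = true := by
  simp only [PySem.Chars.strip, PySem.Chars.rstrip, PySem.Chars.lstrip, List.reverse_eq_nil_iff,
    List.dropWhile_eq_nil_iff, List.mem_reverse, List.all_eq_true]
  constructor
  · intro h x hx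
    rcases List.mem_append.1
        ((List.takeWhile_append_dropWhile (p := PySem.Chars.isspace) (l := cs)) ▸ hx) with h1 | h1
    · exact List.mem_takeWhile_imp h1
    · exact h x h1
  · intro h x hx; exact h x ((List.dropWhile_sublist _).subset hx)

lemma pvSet_of_getElem {α : Type} (l : List α) (n : Nat) (a : α) (h : l[n]? = some a) :
    l.set n a = l := by
  rcases List.getElem?_eq_some_iff.1 h with ⟨hn, ha⟩
  apply List.ext_getElem?; intro i
  rcases eq_or_ne i n with rfl | hi
  · simp [hn, ha]
  · simp [List.getElem?_set_ne (Ne.symm hi)]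

lemma pvGet_of_drop (l t : List Char) (j : Nat) (c : Char) (h : l.drop j = c :: t) :
    l[j]? = some c := by
  have h0 : (l.drop j)[0]? = l[j + 0]? := List.getElem?_drop
  simp [h] at h0; simp [h0]

lemma pvDrop_succ (l t : List Char) (j : Nat) (c : Char) (h : l.drop j = c :: t) :
    l.drop (j + 1) = t := by
  have h0 : List.drop 1 (List.drop j l) = List.drop (j + 1) l := List.drop_drop
  rw [h] at h0; simpa using h0.symm

lemma pvNW_take_succ (l0 : List Char) (j : Nat) (c : Char) (h : l0[j]? = some c) :
    pvNW (l0.take (j + 1)) = pvNW (l0.take j) + (if PySem.Chars.isspace c then 0 else 1) := by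
  rw [show l0.take (j + 1) = l0.take j ++ l0[j]?.toList from List.take_add_one]
  simp [pvNW, List.countP_append, h]
  cases hc : PySem.Chars.isspace c <;> simp

lemma pvCond_iff (l0 : List Char) (s j : Nat) (hs : s < j)
    (hc : l0[s]? = some '(') :
    ((pvNW (l0.take j) : Int) = (pvNW (l0.take s) : Int) + 1) ↔ pvCond l0 s j = true := by
  have hsplit : l0.take ((s + 1) + (j - (s + 1))) =
      l0.take (s + 1) ++ (l0.drop (s + 1)).take (j - (s + 1)) := List.take_add
  rw [show s + 1 + (j - (s + 1)) = j by omega] at hsplit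
  have hws : PySem.Chars.isspace '(' = false := by decide
  have h1 : pvNW (l0.take (s + 1)) = pvNW (l0.take s) + 1 := by
    rw [pvNW_take_succ l0 s '(' hc, hws]; simp
  have h2 : pvNW (l0.take j) =
      pvNW (l0.take s) + 1 + pvNW ((l0.drop (s + 1)).take (j - (s + 1))) := by
    rw [hsplit]; unfold pvNW at h1 ⊢; rw [List.countP_append]; omega
  rw [h2]
  simp only [pvCond, List.all_eq_true]
  constructor
  · intro h x hx
    have h0 : pvNW ((l0.drop (s + 1)).take (j - (s + 1))) = 0 := by omega
    have := List.countP_eq_zero.1 h0 x hx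
    simpa using this
  · intro h
    have h0 : pvNW ((l0.drop (s + 1)).take (j - (s + 1))) = 0 :=
      List.countP_eq_zero.2 (fun a ha => by simp [h a ha])
    omega

-- A's second loop equals the reference step list when only whitespace-ness matters:
lemma pvAll_of_map_eq {u v : List Char}
    (h : u.map PySem.Chars.isspace = v.map PySem.Chars.isspace) :
    u.all PySem.Chars.isspace = v.all PySem.Chars.isspace := by
  have h2 : (u.map PySem.Chars.isspace).all id = (v.map PySem.Chars.isspace).all id := by rw [h]
  simpa [List.all_map, Function.id_comp] using h2

lemma pvPhase2 (l0 : List Char) (pr : List (Int × Int)) (hpr : pvPrInv l0 l0.length pr) :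
    ∀ m : List Char, m.map PySem.Chars.isspace = l0.map PySem.Chars.isspace →
      pr.foldl pvAStep2 m = pr.foldl (pvAp l0) m := by
  induction pr with
  | nil => intro m _; rfl
  | cons p pr ih =>
    intro m hm
    rcases hpr p (List.mem_cons_self) with ⟨s, e, rfl, hse, hej, hgs, hge⟩
    have hlen : m.length = l0.length := by
      have := congrArg List.length hm; simpa using this
    have hstep : pvAStep2 m ((s : Int), (e : Int)) = pvAp l0 m ((s : Int), (e : Int)) := by
      simp only [pvAStep2, pvAp]
      have hslice : PySem.List.slice m (some ((s : Int) + 1)) (some (e : Int)) =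
          (m.drop (s + 1)).take (e - (s + 1)) := by
        rw [show ((s : Int) + 1) = ((s + 1 : Nat) : Int) by push_cast; ring]
        exact PySem.List.slice_natCast m (s + 1) e
      have hmap : ((m.drop (s + 1)).take (e - (s + 1))).map PySem.Chars.isspace
          = ((l0.drop (s + 1)).take (e - (s + 1))).map PySem.Chars.isspace := by
        rw [List.map_take, List.map_drop, hm, ← List.map_drop, ← List.map_take]
      have hall : ((m.drop (s + 1)).take (e - (s + 1))).all PySem.Chars.isspace
          = pvCond l0 s e := by
        simpa [pvCond] using pvAll_of_map_eq hmap
      simp only [hslice, pvStrip_nil_iff, hall, Int.toNat_natCast,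
        PySem.List.pySetD_natCast]
    rw [List.foldl_cons, List.foldl_cons, hstep]
    rcases eq_or_ne (pvCond l0 s e) true with hcond | hcond
    · apply ih (fun q hq => hpr q (List.mem_cons_of_mem _ hq))
      simp only [pvAp, hcond, if_pos, Int.toNat_natCast, List.map_set, hm]
      have hgs' : (l0.map PySem.Chars.isspace)[s]? = some false := by
        simp [List.getElem?_map, hgs]; decide
      have hge' : (l0.map PySem.Chars.isspace)[e]? = some false := by
        simp [List.getElem?_map, hge]; decide
      rw [show PySem.Chars.isspace 'ㄱ' = false from by decide,
          show PySem.Chars.isspace 'ㄴ' = false from by decide]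
      rw [pvSet_of_getElem _ s false hgs']
      exact pvSet_of_getElem _ e false hge'
    · apply ih (fun q hq => hpr q (List.mem_cons_of_mem _ hq))
      simpa [pvAp, hcond] using hm

lemma pvStInv_mono {l0 : List Char} {j j' : Nat} {st : List Int}
    (h : pvStInv l0 j st) (hj : j ≤ j') : pvStInv l0 j' st := by
  intro x hx; rcases h x hx with ⟨k, rfl, hk, hg⟩; exact ⟨k, rfl, by omega, hg⟩

lemma pvPrInv_mono {l0 : List Char} {j j' : Nat} {pr : List (Int × Int)}
    (h : pvPrInv l0 j pr) (hj : j ≤ j') : pvPrInv l0 j' pr := by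
  intro p hp; rcases h p hp with ⟨s, e, rfl, h1, h2, h3, h4⟩
  exact ⟨s, e, rfl, h1, by omega, h3, h4⟩

lemma pvPrInv_len {l0 : List Char} {j : Nat} {pr : List (Int × Int)}
    (h : pvPrInv l0 j pr) : pvPrInv l0 l0.length pr := by
  intro p hp; rcases h p hp with ⟨s, e, rfl, h1, h2, h3, h4⟩
  rcases List.getElem?_eq_some_iff.1 h4 with ⟨he, _⟩
  exact ⟨s, e, rfl, h1, he, h3, h4⟩

-- A's first loop keeps the pair invariant
lemma pvPhase1_inv (l0 : List Char) (rest : List Char) :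
    ∀ (j : Nat) (st : List Int) (pr : List (Int × Int)),
      l0.drop j = rest → pvStInv l0 j st → pvPrInv l0 j pr →
      pvPrInv l0 l0.length ((PySem.List.enumerate rest (j : Int)).foldl pvAStep1 (st, pr)).2 := by
  induction rest with
  | nil =>
    intro j st pr _ _ hpr
    simpa [PySem.List.enumerate_nil] using pvPrInv_len hpr
  | cons c t ih =>
    intro j st pr h hst hpr
    have hget := pvGet_of_drop l0 t j c h
    have hdrop := pvDrop_succ l0 t j c h
    rw [PySem.List.enumerate_cons, show ((j : Int) + 1) = ((j + 1 : Nat) : Int) by push_cast; ring,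
      List.foldl_cons]
    by_cases hco : c = '('
    · subst hco
      have hstep : pvAStep1 (st, pr) ((j : Int), '(') = ((j : Int) :: st, pr) := by
        simp [pvAStep1]
      rw [hstep]
      refine ih (j + 1) _ _ hdrop ?_ (pvPrInv_mono hpr (by omega))
      intro x hx
      rcases List.mem_cons.1 hx with rfl | hx'
      · exact ⟨j, rfl, by omega, hget⟩
      · exact pvStInv_mono hst (by omega) x hx'
    · by_cases hcc : c = ')'
      · subst hcc
        cases st with
        | nil =>
          have hstep : pvAStep1 (([] : List Int), pr) ((j : Int), ')') = ([], pr) := by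
            simp [pvAStep1]
          rw [hstep]
          exact ih (j + 1) _ _ hdrop (by intro x hx; simp at hx)
            (pvPrInv_mono hpr (by omega))
        | cons x st' =>
          have hstep : pvAStep1 ((x :: st' : List Int), pr) ((j : Int), ')') =
              (st', pr ++ [(x, (j : Int))]) := by simp [pvAStep1]
          rw [hstep]
          refine ih (j + 1) _ _ hdrop
            (fun y hy => pvStInv_mono hst (by omega) y (List.mem_cons_of_mem _ hy)) ?_
          intro p hp
          rcases List.mem_append.1 hp with hp' | hp'
          · exact pvPrInv_mono hpr (by omega) p hp'
          · rcases hst x List.mem_cons_self with ⟨s, rfl, hs, hgs⟩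
            simp at hp'; subst hp'
            exact ⟨s, j, rfl, hs, by omega, hgs, hget⟩
      · have hstep : pvAStep1 (st, pr) ((j : Int), c) = (st, pr) := by
          simp [pvAStep1, hco, hcc]
        rw [hstep]
        exact ih (j + 1) _ _ hdrop (pvStInv_mono hst (by omega))
          (pvPrInv_mono hpr (by omega))

-- the coupled induction: B's single loop computes A's pairs-and-apply result
lemma pvCouple (l0 : List Char) (rest : List Char) :
    ∀ (j : Nat) (st : List Int) (pr : List (Int × Int)),
      l0.drop j = rest → pvStInv l0 j st → pvPrInv l0 j pr →
      (PySem.List.enumerate rest (j : Int)).foldl pvBStep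
          (pr.foldl (pvAp l0) l0,
           st.map (fun x => (x, (pvNW (l0.take x.toNat) : Int))),
           (pvNW (l0.take j) : Int))
        =
        ((((PySem.List.enumerate rest (j : Int)).foldl pvAStep1 (st, pr)).2).foldl (pvAp l0) l0,
         (((PySem.List.enumerate rest (j : Int)).foldl pvAStep1 (st, pr)).1).map
           (fun x => (x, (pvNW (l0.take x.toNat) : Int))),
         (pvNW l0 : Int)) := by
  induction rest with
  | nil =>
    intro j st pr h _ _
    have hlen : l0.length ≤ j := by
      have := congrArg List.length h; simp at this; omega
    simp [PySem.List.enumerate_nil, List.take_of_length_le hlen]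
  | cons c t ih =>
    intro j st pr h hst hpr
    have hget := pvGet_of_drop l0 t j c h
    have hdrop := pvDrop_succ l0 t j c h
    rw [PySem.List.enumerate_cons, show ((j : Int) + 1) = ((j + 1 : Nat) : Int) by push_cast; ring,
      List.foldl_cons, List.foldl_cons]
    by_cases hco : c = '('
    · subst hco
      have hwsp : PySem.Chars.isspace '(' = false := by decide
      have hnw1 : (pvNW (l0.take (j + 1)) : Int) = (pvNW (l0.take j) : Int) + 1 := by
        rw [pvNW_take_succ l0 j '(' hget, hwsp]; push_cast; simp
      have hB : pvBStep
          (pr.foldl (pvAp l0) l0,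
           st.map (fun x => (x, (pvNW (l0.take x.toNat) : Int))),
           (pvNW (l0.take j) : Int)) ((j : Int), '(') =
          (pr.foldl (pvAp l0) l0,
           ((j : Int) :: st).map (fun x => (x, (pvNW (l0.take x.toNat) : Int))),
           (pvNW (l0.take (j + 1)) : Int)) := by
        simp [pvBStep, hwsp, hnw1]
      have hA : pvAStep1 (st, pr) ((j : Int), '(') = ((j : Int) :: st, pr) := by
        simp [pvAStep1]
      rw [hB, hA]
      refine ih (j + 1) _ _ hdrop ?_ (pvPrInv_mono hpr (by omega))
      intro x hx
      rcases List.mem_cons.1 hx with rfl | hx'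
      · exact ⟨j, rfl, by omega, hget⟩
      · exact pvStInv_mono hst (by omega) x hx'
    · by_cases hcc : c = ')'
      · subst hcc
        have hwsp : PySem.Chars.isspace ')' = false := by decide
        have hnw1 : (pvNW (l0.take (j + 1)) : Int) = (pvNW (l0.take j) : Int) + 1 := by
          rw [pvNW_take_succ l0 j ')' hget, hwsp]; push_cast; simp
        cases st with
        | nil =>
          have hB : pvBStep
              (pr.foldl (pvAp l0) l0,
               ([] : List Int).map (fun x => (x, (pvNW (l0.take x.toNat) : Int))),
               (pvNW (l0.take j) : Int)) ((j : Int), ')') =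
              (pr.foldl (pvAp l0) l0, [],
               (pvNW (l0.take (j + 1)) : Int)) := by
            simp [pvBStep, hwsp, hnw1]
          have hA : pvAStep1 (([] : List Int), pr) ((j : Int), ')') = ([], pr) := by
            simp [pvAStep1]
          rw [hB, hA]
          exact ih (j + 1) [] pr hdrop (by intro x hx; simp at hx)
            (pvPrInv_mono hpr (by omega))
        | cons x st' =>
          rcases hst x List.mem_cons_self with ⟨sk, rfl, hsk, hgs⟩
          have hcond := pvCond_iff l0 sk j hsk hgs
          have hout : (if (pvNW (l0.take j) : Int) = (pvNW (l0.take sk) : Int) + 1 then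
                PySem.List.pySetD
                  (PySem.List.pySetD (pr.foldl (pvAp l0) l0) ((sk : Nat) : Int) 'ㄱ')
                  ((j : Nat) : Int) 'ㄴ'
              else pr.foldl (pvAp l0) l0) =
              (pr ++ [(((sk : Nat) : Int), ((j : Nat) : Int))]).foldl (pvAp l0) l0 := by
            rw [List.foldl_append]
            by_cases hEq : (pvNW (l0.take j) : Int) = (pvNW (l0.take sk) : Int) + 1
            · have hc2 : pvCond l0 sk j = true := hcond.1 hEq
              simp [hEq, List.foldl_cons, pvAp, hc2]
            · have hc2 : pvCond l0 sk j ≠ true := fun hc2 => hEq (hcond.2 hc2)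
              simp [hEq, List.foldl_cons, pvAp, hc2]
          have hB : pvBStep
              (pr.foldl (pvAp l0) l0,
               (((sk : Nat) : Int) :: st').map (fun x => (x, (pvNW (l0.take x.toNat) : Int))),
               (pvNW (l0.take j) : Int)) ((j : Int), ')') =
              ((pr ++ [(((sk : Nat) : Int), ((j : Nat) : Int))]).foldl (pvAp l0) l0,
               st'.map (fun x => (x, (pvNW (l0.take x.toNat) : Int))),
               (pvNW (l0.take (j + 1)) : Int)) := by
            simp only [pvBStep, List.map_cons, hwsp, hnw1]
            simp only [show ¬((')' : Char) = '(') by decide, if_false, Int.toNat_natCast]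
            rw [← hout]
            simp
          have hA : pvAStep1 ((((sk : Nat) : Int) :: st', pr)) ((j : Int), ')') =
              (st', pr ++ [(((sk : Nat) : Int), ((j : Nat) : Int))]) := by
            simp [pvAStep1]
          rw [hB, hA]
          refine ih (j + 1) _ _ hdrop
            (fun y hy => pvStInv_mono hst (by omega) y (List.mem_cons_of_mem _ hy)) ?_
          intro p hp
          rcases List.mem_append.1 hp with hp' | hp'
          · exact pvPrInv_mono hpr (by omega) p hp'
          · simp at hp'; subst hp'
            exact ⟨sk, j, rfl, hsk, by omega, hgs, hget⟩
      · have hnw1 : (pvNW (l0.take (j + 1)) : Int) =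
            (if PySem.Chars.isspace c then (pvNW (l0.take j) : Int)
             else (pvNW (l0.take j) : Int) + 1) := by
          rw [pvNW_take_succ l0 j c hget]
          cases hws : PySem.Chars.isspace c <;> push_cast <;> simp
        have hB : pvBStep
            (pr.foldl (pvAp l0) l0,
             st.map (fun x => (x, (pvNW (l0.take x.toNat) : Int))),
             (pvNW (l0.take j) : Int)) ((j : Int), c) =
            (pr.foldl (pvAp l0) l0,
             st.map (fun x => (x, (pvNW (l0.take x.toNat) : Int))),
             (pvNW (l0.take (j + 1)) : Int)) := by
          simp [pvBStep, hco, hcc, hnw1]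
        have hA : pvAStep1 (st, pr) ((j : Int), c) = (st, pr) := by
          simp [pvAStep1, hco, hcc]
        rw [hB, hA]
        exact ih (j + 1) _ _ hdrop (pvStInv_mono hst (by omega))
          (pvPrInv_mono hpr (by omega))

-- ===== VERDICT (by name: the statement is the Claim_ definition above) =====
theorem replace_empty_parentheses_spec : Claim_equal_replace_empty_parentheses := by
  intro sql _
  unfold Spec_replace_empty_parentheses
  show replace_empty_parentheses sql = replace_empty_parentheses_alt sql
  have hst0 : pvStInv sql.toList 0 [] := by intro x hx; simp at hx
  have hpr0 : pvPrInv sql.toList 0 [] := by intro p hp; simp at hp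
  have hcouple := pvCouple sql.toList sql.toList 0 [] [] (by simp) hst0 hpr0
  have hinv := pvPhase1_inv sql.toList sql.toList 0 [] [] (by simp) hst0 hpr0
  simp only [Nat.cast_zero] at hcouple hinv
  simp only [List.foldl_nil, List.map_nil, List.take_zero, pvNW, List.countP_nil,
    Nat.cast_zero] at hcouple
  have hphase2 := pvPhase2 sql.toList _ hinv sql.toList rfl
  show (if ((PySem.List.enumerate sql.toList).foldl pvAStep1 ([], [])).2 = [] then sql
        else String.ofList
          (((PySem.List.enumerate sql.toList).foldl pvAStep1 ([], [])).2.foldl pvAStep2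
            sql.toList)) =
      String.ofList
        (((PySem.List.enumerate sql.toList).foldl pvBStep (sql.toList, [], 0)).1)
  rw [hcouple, hphase2]
  by_cases hres : ((PySem.List.enumerate sql.toList).foldl pvAStep1 ([], [])).2 = []
  · rw [if_pos hres, hres]
    exact String.ofList_toList.symm
  · rw [if_neg hres]
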